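-- pv_equiv track=rewrite | github.com/Neurojedi/Biofunctions | proteins/LinearSubpeptideCount.py | LinearSubpeptideCount
-- ===== SOURCE A (Python) =====
-- def LinearSubpeptideCount(x):
--     count = 0
--     for i in range(1, x + 1):
--         if i <= 2:
--             count+= 2
--         else:
--             count+=i
--     return count
-- ===== SOURCE B (Python) =====
-- def LinearSubpeptideCount(x):
--     # Closed form: for x >= 2, 2+2 + sum(3..x) = x*(x+1)//2 + 1; small cases directly.
--     if x <= 0:
--         return 0
--     if x == 1:
--         return 2
--     return x * (x + 1) // 2 + 1
-- ===== Notes on version B (the rewrite author's own statement) =====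
-- stated objective: faster
-- what changed: Replaces the O(x) accumulation loop by a closed-form arithmetic-series formula x*(x+1)//2 + 1 with direct small cases x<=0 and x==1.
import Mathlib
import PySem

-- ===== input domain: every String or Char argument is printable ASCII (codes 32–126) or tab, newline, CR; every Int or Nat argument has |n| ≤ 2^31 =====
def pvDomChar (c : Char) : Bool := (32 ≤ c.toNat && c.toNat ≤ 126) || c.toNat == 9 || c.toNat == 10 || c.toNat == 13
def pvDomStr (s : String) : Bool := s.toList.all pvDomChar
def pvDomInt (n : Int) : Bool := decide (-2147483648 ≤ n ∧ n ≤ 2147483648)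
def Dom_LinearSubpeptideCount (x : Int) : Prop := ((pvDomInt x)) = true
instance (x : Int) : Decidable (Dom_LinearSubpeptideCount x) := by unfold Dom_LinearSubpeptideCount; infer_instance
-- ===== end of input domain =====

-- B replaces A's O(x) loop by the closed-form x*(x+1)//2 + 1 with direct small cases (objective: faster).

-- ===== PORT A =====
def LinearSubpeptideCount (x : Int) : Int :=
  (PySem.List.pyRange 1 (x + 1) 1).foldl
    (fun count i => if i ≤ 2 then count + 2 else count + i) 0

-- ===== PORT B =====
def LinearSubpeptideCount_alt (x : Int) : Int :=
  if x ≤ 0 then 0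
  else if x = 1 then 2
  else PySem.Int.floordiv (x * (x + 1)) 2 + 1

-- ===== PRECONDITION & SPEC =====
def Spec_LinearSubpeptideCount (x : Int) (out : Int) : Prop := out = LinearSubpeptideCount_alt x
instance (x : Int) (out : Int) : Decidable (Spec_LinearSubpeptideCount x out) := by unfold Spec_LinearSubpeptideCount; infer_instance

-- ===== CLAIM (what is proved, stated in full; the proofs are below) =====
def Claim_equal_LinearSubpeptideCount : Prop := ∀ (x : Int), Dom_LinearSubpeptideCount x → Spec_LinearSubpeptideCount x (LinearSubpeptideCount x)

-- ===== LEMMAS AND PROOFS =====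

-- Closed form for A's loop run over 1..n.
lemma pvLoop_closed (n : Nat) :
    ((List.range n).map (fun k : Nat => (1 : Int) + (k : Int))).foldl
      (fun count i => if i ≤ 2 then count + 2 else count + i) 0 =
    if (n : Int) ≤ 0 then 0 else if (n : Int) = 1 then 2 else ((n : Int) * (n + 1)) / 2 + 1 := by
  induction n with
  | zero => simp
  | succ m ih =>
    rw [List.range_succ, List.map_append, List.foldl_append, ih]
    simp only [List.map, List.foldl]
    push_cast
    have h2 : ((m:Int)+1)*(((m:Int)+1)+1) = (m:Int)*((m:Int)+1) + 2*((m:Int)+1) := by ring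
    have h4 : 2 * ((((m:Int)+1)*(((m:Int)+1)+1)) / 2) = ((m:Int)+1)*(((m:Int)+1)+1) :=
      Int.two_mul_ediv_two_of_even (Int.even_mul_succ_self _)
    have h5 : 2 * (((m:Int)*((m:Int)+1)) / 2) = (m:Int)*((m:Int)+1) :=
      Int.two_mul_ediv_two_of_even (Int.even_mul_succ_self _)
    split_ifs <;> try omega
    -- remaining branch forces m = 1; substitute and compute
    have hm1 : m = 1 := by omega
    subst hm1
    norm_num

theorem LinearSubpeptideCount_spec : Claim_equal_LinearSubpeptideCount := by
  intro x _
  unfold Spec_LinearSubpeptideCount LinearSubpeptideCount LinearSubpeptideCount_alt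
  rw [PySem.List.pyRange_one]
  have h : x + 1 - 1 = x := by ring
  rw [h, pvLoop_closed x.toNat]
  by_cases hx : x ≤ 0
  · have ht : x.toNat = 0 := by omega
    simp [hx, ht]
  · replace hx : 0 < x := by omega
    have hxe : (x.toNat : Int) = x := Int.toNat_of_nonneg hx.le
    rw [hxe]
    have hnle : ¬ x ≤ 0 := not_le.mpr hx
    simp only [hnle, if_false]
    by_cases h1 : x = 1
    · simp [h1]
    · simp only [h1, if_false]
      -- Python // with positive divisor equals Euclidean division here
      simp [PySem.Int.floordiv, Int.fdiv_eq_ediv]
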